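-- pv_equiv track=rewrite | github.com/Jaycelation/Python-PTIT | PY01039 - Kiem tra so dep.py | check
-- ===== SOURCE A (Python) =====
-- def check(n):
--     if len(set(n)) != 2:
--         return False
--     c = n[0]
--     for i in range(2, len(n)):
--         if n[i] != n[i-2]:
--             return False
--     return True
-- ===== SOURCE B (Python) =====
-- def check(n):
--     # Build-and-compare: construct the expected alternating string from the
--     # first two characters and compare it to n (plus the two-distinct guard).
--     if len(set(n)) != 2:
--         return False
--     pattern = (n[0] + n[1]) * (len(n) // 2 + 1)
--     return n == pattern[:len(n)]
-- ===== Notes on version B (the rewrite author's own statement) =====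
-- stated objective: alternative
-- what changed: Instead of scanning indices comparing n[i] with n[i-2], B constructs the expected alternating string from the first two characters ((n[0]+n[1]) repeated, truncated to len(n)) and compares it to n, keeping the len(set(n)) == 2 guard.
import Mathlib
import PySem

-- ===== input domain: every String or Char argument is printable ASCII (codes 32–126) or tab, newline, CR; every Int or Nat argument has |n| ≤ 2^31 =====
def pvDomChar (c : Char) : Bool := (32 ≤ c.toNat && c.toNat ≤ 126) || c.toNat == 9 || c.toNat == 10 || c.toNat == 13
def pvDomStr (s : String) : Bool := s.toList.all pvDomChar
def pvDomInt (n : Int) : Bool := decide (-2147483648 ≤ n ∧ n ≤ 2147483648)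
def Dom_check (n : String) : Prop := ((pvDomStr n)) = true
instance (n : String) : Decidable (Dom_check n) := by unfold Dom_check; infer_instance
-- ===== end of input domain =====

-- B builds the expected alternating string from n[0],n[1] and compares it to n, instead of A's index loop; return values are proved equal.

-- ===== PORT A =====
def check (n : String) : Bool :=
  if PySem.Set.len (PySem.Set.ofList n.toList) ≠ 2 then false
  else
    -- A binds c = n[0] and never uses it (the guard guarantees the index exists); dead binding elided
    (PySem.List.pyRange 2 n.toList.length 1).all fun i =>
      PySem.List.pyGet? n.toList i == PySem.List.pyGet? n.toList (i - 2)

-- ===== PORT B =====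
def check_alt (n : String) : Bool :=
  if PySem.Set.len (PySem.Set.ofList n.toList) ≠ 2 then false
  else
    -- n[0], n[1] exist (the guard forces length ≥ 2); the match only makes the indexing total
    match PySem.List.pyGet? n.toList 0, PySem.List.pyGet? n.toList 1 with
    | some a, some b =>
        -- pattern = (n[0] + n[1]) * (len(n) // 2 + 1); return n == pattern[:len(n)]
        n.toList ==
          PySem.List.slice ((List.replicate (n.toList.length / 2 + 1) [a, b]).flatten)
            none (some (n.toList.length : Int))
    | _, _ => false

-- ===== PRECONDITION & SPEC =====
def Spec_check (n : String) (out : Bool) : Prop := out = check_alt n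
instance (n : String) (out : Bool) : Decidable (Spec_check n out) := by unfold Spec_check; infer_instance

-- ===== CLAIM (what is proved, stated in full; the proofs are below) =====
def Claim_equal_check : Prop := ∀ (n : String), Dom_check n → Spec_check n (check n)

-- ===== LEMMAS AND PROOFS =====

-- elements of (replicate k [a,b]).flatten alternate a, b
lemma flat_getElem? {α : Type} (k : Nat) (a b : α) (i : Nat) :
    ((List.replicate k [a, b]).flatten)[i]? =
      if i < 2 * k then some (if i % 2 = 0 then a else b) else none := by
  induction k generalizing i with
  | zero => simp
  | succ m ih =>
    rw [List.replicate_succ, List.flatten_cons]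
    simp only [List.cons_append, List.nil_append]
    match i with
    | 0 => rw [List.getElem?_cons_zero, if_pos (by omega : 0 < 2 * (m + 1))]; norm_num
    | 1 =>
      rw [List.getElem?_cons_succ, List.getElem?_cons_zero,
        if_pos (by omega : 1 < 2 * (m + 1))]
      norm_num
    | j + 2 =>
      rw [List.getElem?_cons_succ, List.getElem?_cons_succ, ih j]
      by_cases hj : j < 2 * m
      · rw [if_pos hj, if_pos (by omega : j + 2 < 2 * (m + 1))]
        have h2 : (j + 2) % 2 = j % 2 := by omega
        rw [h2]
      · rw [if_neg hj, if_neg (by omega)]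

-- A's loop condition: every element equals the one two before it
lemma loop_iff (l : List Char) :
    ((PySem.List.pyRange 2 l.length 1).all fun i =>
        PySem.List.pyGet? l i == PySem.List.pyGet? l (i - 2)) = true ↔
      ∀ j, (h : j + 2 < l.length) → l[j + 2] = l[j] := by
  rw [List.all_eq_true]
  constructor
  · intro hall j h
    have hmem : ((j : Int) + 2) ∈ PySem.List.pyRange 2 l.length 1 := by
      rw [PySem.List.mem_pyRange_one]
      constructor <;> [omega; exact_mod_cast (by omega : (j:Int) + 2 < (l.length : Int))]
    have := hall _ hmem
    simp only [beq_iff_eq] at this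
    rw [show ((j : Int) + 2) - 2 = (j : Int) by ring] at this
    rw [PySem.List.pyGet?_natCast] at this
    rw [show ((j : Int) + 2) = ((j + 2 : Nat) : Int) by push_cast; ring] at this
    rw [PySem.List.pyGet?_natCast] at this
    rw [List.getElem?_eq_getElem h, List.getElem?_eq_getElem (by omega : j < l.length)] at this
    exact Option.some.inj this
  · intro hp i hmem
    rw [PySem.List.mem_pyRange_one] at hmem
    obtain ⟨h2, hlt⟩ := hmem
    simp only [beq_iff_eq]
    obtain ⟨k, rfl⟩ : ∃ k : Nat, i = (k : Int) + 2 := ⟨(i - 2).toNat, by omega⟩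
    have hk : k + 2 < l.length := by
      exact_mod_cast (by push_cast at hlt ⊢; omega : ((k + 2 : Nat) : Int) < (l.length : Int))
    rw [show ((k : Int) + 2) - 2 = (k : Int) by ring]
    rw [show ((k : Int) + 2) = ((k + 2 : Nat) : Int) by push_cast; ring]
    rw [PySem.List.pyGet?_natCast, PySem.List.pyGet?_natCast]
    rw [List.getElem?_eq_getElem hk, List.getElem?_eq_getElem (by omega : k < l.length)]
    exact congrArg some (hp k hk)

-- two-back periodicity ↔ every position carries l[0]/l[1] by parity
lemma periodic_iff (l : List Char) (h1 : 1 < l.length) :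
    (∀ j, (h : j + 2 < l.length) → l[j + 2] = l[j]) ↔
      ∀ i, (h : i < l.length) →
        l[i] = if i % 2 = 0 then l[0]'(by omega) else l[1]'h1 := by
  constructor
  · intro hp i
    induction i using Nat.strong_induction_on with
    | _ i ih =>
      intro h
      match i with
      | 0 => simp
      | 1 => simp
      | j + 2 =>
        rw [hp j h, ih j (by omega) (by omega)]
        have : (j + 2) % 2 = j % 2 := by omega
        rw [this]
  · intro hq j h
    rw [hq (j + 2) h, hq j (by omega)]
    have : (j + 2) % 2 = j % 2 := by omega
    rw [this]

-- B's pattern comparison ↔ parity characterisation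
lemma pattern_iff (l : List Char) (a b : Char) :
    (l = ((List.replicate (l.length / 2 + 1) [a, b]).flatten).take l.length) ↔
      ∀ i, (h : i < l.length) → l[i] = if i % 2 = 0 then a else b := by
  constructor
  · intro he i h
    have : l[i]? = (((List.replicate (l.length / 2 + 1) [a, b]).flatten).take l.length)[i]? := by
      rw [← he]
    rw [List.getElem?_take, if_pos h, flat_getElem?, if_pos (by omega)] at this
    rw [List.getElem?_eq_getElem h] at this
    exact Option.some.inj this
  · intro hq
    apply List.ext_getElem?
    intro i
    rw [List.getElem?_take, flat_getElem?]
    by_cases h : i < l.length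
    · rw [if_pos h, if_pos (by omega), List.getElem?_eq_getElem h, hq i h]
    · rw [if_neg h, List.getElem?_eq_none (by omega)]

-- guard = 2 forces at least two characters
lemma len_ge_two (l : List Char) (hg : PySem.Set.len (PySem.Set.ofList l) = 2) :
    1 < l.length := by
  match l with
  | [] => simp [PySem.Set.ofList, PySem.Set.len] at hg
  | [c] => simp [PySem.Set.ofList, PySem.Set.add, PySem.Set.len, PySem.Set.contains] at hg
  | c :: d :: t => simp

-- ===== VERDICT (by name: the statement is the Claim_ definition above) =====
theorem check_spec : Claim_equal_check := by
  intro n _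
  unfold Spec_check check check_alt
  by_cases hg : PySem.Set.len (PySem.Set.ofList n.toList) = 2
  · rw [if_neg (fun h => h hg), if_neg (fun h => h hg)]
    have h1 : 1 < n.toList.length := len_ge_two n.toList hg
    have hget0 : PySem.List.pyGet? n.toList 0 = some (n.toList[0]'(by omega)) := by
      rw [show (0 : Int) = ((0 : Nat) : Int) by norm_num, PySem.List.pyGet?_natCast,
        List.getElem?_eq_getElem (by omega)]
    have hget1 : PySem.List.pyGet? n.toList 1 = some (n.toList[1]'h1) := by
      rw [show (1 : Int) = ((1 : Nat) : Int) by norm_num, PySem.List.pyGet?_natCast,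
        List.getElem?_eq_getElem h1]
    rw [hget0, hget1]
    dsimp only
    have hslice : PySem.List.slice
        ((List.replicate (n.toList.length / 2 + 1) [n.toList[0]'(by omega), n.toList[1]'h1]).flatten)
        none (some (n.toList.length : Int))
        = ((List.replicate (n.toList.length / 2 + 1) [n.toList[0]'(by omega), n.toList[1]'h1]).flatten).take n.toList.length :=
      PySem.List.slice_to_natCast _ _
    rw [hslice, Bool.eq_iff_iff, loop_iff, beq_iff_eq, pattern_iff, periodic_iff n.toList h1]
  · rw [if_pos hg, if_pos hg]
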